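-- pv_equiv track=rewrite | github.com/ema11412/ANPI | Examenes/Examen2/Programado/examen2.py | agregarD
-- ===== SOURCE A (Python) =====
-- def agregarD(M,x):
--     #Agrega diagonal a matriz
--     i=0
--     while i<len(M):
--         j=0
--         while j<len(M):
--             if i==j:
--                 M[i][j] = x[j]
--             j+=1
--         i+=1
--
--     return M
-- ===== SOURCE B (Python) =====
-- def agregarD(M, x):
--     # Single pass over the rows: write x[i] into row i at column i.
--     for i, row in enumerate(M):
--         row[i] = x[i]
--     return M
-- ===== Notes on version B (the rewrite author's own statement) =====
-- stated objective: faster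
-- what changed: Replaces the nested O(n^2) index scan (testing i==j for every pair) with a single enumerate pass that writes x[i] directly into row i.
import Mathlib
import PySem

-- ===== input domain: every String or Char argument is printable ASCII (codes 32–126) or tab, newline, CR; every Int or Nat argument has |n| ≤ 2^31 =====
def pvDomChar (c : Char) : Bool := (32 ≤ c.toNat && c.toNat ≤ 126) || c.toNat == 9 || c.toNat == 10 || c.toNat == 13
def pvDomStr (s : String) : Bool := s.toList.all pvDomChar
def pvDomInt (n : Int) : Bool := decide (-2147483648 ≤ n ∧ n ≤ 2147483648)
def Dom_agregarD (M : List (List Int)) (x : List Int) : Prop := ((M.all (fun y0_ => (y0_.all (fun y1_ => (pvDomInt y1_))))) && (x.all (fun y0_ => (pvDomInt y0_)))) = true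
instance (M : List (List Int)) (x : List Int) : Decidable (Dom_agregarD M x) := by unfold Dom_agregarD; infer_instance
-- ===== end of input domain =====

-- B replaces A's nested O(n^2) index scan by one pass over the rows (enumerate); equivalence is
-- about the return value (both Pythons also mutate M in place identically).
-- Ports use pyGetD/pySetD total forms, exact within Pre_ (Python raises outside; excluded there).

-- ===== PORT A =====
def agregarD (M : List (List Int)) (x : List Int) : List (List Int) :=
  (PySem.List.pyRange 0 (M.length : Int) 1).foldl (fun acc i =>
    (PySem.List.pyRange 0 (M.length : Int) 1).foldl (fun acc2 j =>
      if i == j then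
        PySem.List.pySetD acc2 i
          (PySem.List.pySetD (PySem.List.pyGetD acc2 i []) j (PySem.List.pyGetD x j 0))
      else acc2) acc) M

-- ===== PORT B =====
def agregarD_alt (M : List (List Int)) (x : List Int) : List (List Int) :=
  (PySem.List.enumerate M 0).map (fun p =>
    PySem.List.pySetD p.2 p.1 (PySem.List.pyGetD x p.1 0))

-- ===== PRECONDITION & SPEC =====
-- Pre_: exactly the inputs where Python A returns (row i and x must have an index i for every i < len M);
-- outside it A raises IndexError.
def Pre_agregarD (M : List (List Int)) (x : List Int) : Prop :=
  ∀ i ∈ List.range M.length, i < (M.getD i []).length ∧ i < x.length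
instance (M : List (List Int)) (x : List Int) : Decidable (Pre_agregarD M x) := by
  unfold Pre_agregarD; infer_instance
def pvWitness_agregarD : List (List Int) × List Int := ([[1, 2], [3, 4]], [7, 8])

def Spec_agregarD (M : List (List Int)) (x : List Int) (out : List (List Int)) : Prop := out = agregarD_alt M x
instance (M : List (List Int)) (x : List Int) (out : List (List Int)) : Decidable (Spec_agregarD M x out) := by unfold Spec_agregarD; infer_instance

-- ===== CLAIM (what is proved, stated in full; the proofs are below) =====
def Claim_equal_agregarD : Prop := ∀ (M : List (List Int)) (x : List Int), Dom_agregarD M x → Pre_agregarD M x → Spec_agregarD M x (agregarD M x)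

-- ===== LEMMAS AND PROOFS =====

-- the effect of one outer iteration of A, after the inner scan collapses
def diagStep (x : List Int) (acc : List (List Int)) (i : Nat) : List (List Int) :=
  acc.set i ((acc.getD i []).set i (x.getD i 0))

-- a fold whose step only fires on i does nothing if i is absent
theorem foldl_if_not_mem {α : Type} (i : Nat) (F : α → Nat → α) (L : List Nat) (acc : α)
    (h : i ∉ L) :
    L.foldl (fun a j => if i = j then F a j else a) acc = acc := by
  induction L generalizing acc with
  | nil => rfl
  | cons b L ih =>
    have hib : i ≠ b := fun e => h (e ▸ List.mem_cons_self ..)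
    simp only [List.foldl_cons, if_neg hib]
    exact ih acc (fun hm => h (List.mem_cons_of_mem _ hm))

-- over range n the step fires exactly once, at j = i
theorem foldl_if_range {α : Type} (i n : Nat) (hi : i < n) (F : α → Nat → α) (acc : α) :
    (List.range n).foldl (fun a j => if i = j then F a j else a) acc = F acc i := by
  induction n generalizing acc with
  | zero => omega
  | succ m ih =>
    rw [List.range_succ, List.foldl_append]
    rcases Nat.lt_or_ge i m with h | h
    · rw [ih h]
      have : i ≠ m := by omega
      simp [this]
    · have him : i = m := by omega
      subst him
      rw [foldl_if_not_mem i F _ acc (by simp)]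
      simp

theorem length_foldl_diagStep (x : List Int) (M : List (List Int)) (L : List Nat) :
    (L.foldl (diagStep x) M).length = M.length := by
  induction L generalizing M with
  | nil => rfl
  | cons b L ih => rw [List.foldl_cons]; rw [ih]; simp [diagStep]

theorem foldl_diagStep_getElem? (x : List Int) (M : List (List Int)) (n : Nat)
    (hn : n ≤ M.length) : ∀ k : Nat,
    ((List.range n).foldl (diagStep x) M)[k]? =
      if k < n then some ((M.getD k []).set k (x.getD k 0)) else M[k]? := by
  induction n with
  | zero => simp
  | succ m ih =>
    intro k
    have hm : m < M.length := by omega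
    rw [List.range_succ, List.foldl_append, List.foldl_cons, List.foldl_nil]
    set prev := (List.range m).foldl (diagStep x) M with hprev
    have hlen : prev.length = M.length := length_foldl_diagStep x M _
    have hpm : prev[m]? = M[m]? := by rw [ih (by omega) m]; simp
    have hgd : prev.getD m [] = M.getD m [] := by
      rw [List.getD_eq_getElem?_getD, List.getD_eq_getElem?_getD, hpm]
    simp only [diagStep, List.getElem?_set, hlen, hgd]
    by_cases hk : m = k
    · subst hk
      simp [hm, List.getD_eq_getElem?_getD]
    · rw [if_neg hk, ih (by omega) k]
      by_cases h2 : k < m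
      · rw [if_pos h2, if_pos (by omega)]
      · rw [if_neg h2, if_neg (by omega)]

theorem alt_getElem? (M : List (List Int)) (x : List Int) (k : Nat) :
    (agregarD_alt M x)[k]? = M[k]?.map (fun r => r.set k (x.getD k 0)) := by
  unfold agregarD_alt
  rw [List.getElem?_map, PySem.List.getElem?_enumerate]
  cases hx : M[k]? with
  | none => simp
  | some r => simp

-- A's double fold collapses to the single-update fold
theorem agregarD_eq_fold (M : List (List Int)) (x : List Int) :
    agregarD M x = (List.range M.length).foldl (diagStep x) M := by
  unfold agregarD
  rw [PySem.List.pyRange_zero_natCast]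
  rw [List.foldl_map]
  apply PySem.List.foldl_congr_mem
  intro acc i hi
  have hi' : i < M.length := List.mem_range.mp hi
  rw [List.foldl_map]
  have hstep : (fun (acc2 : List (List Int)) (j : Nat) =>
      if ((i : Int) == (j : Int)) = true then
        PySem.List.pySetD acc2 (i : Int)
          (PySem.List.pySetD (PySem.List.pyGetD acc2 (i : Int) []) (j : Int)
            (PySem.List.pyGetD x (j : Int) 0))
      else acc2)
      = (fun (a : List (List Int)) (j : Nat) =>
          if i = j then diagStep x a j else a) := by
    funext a j
    by_cases hij : i = j
    · subst hij
      simp [diagStep, PySem.List.pySetD_natCast, PySem.List.pyGetD_natCast]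
    · have : ¬ ((i : Int) == (j : Int)) = true := by
        simp only [beq_iff_eq]
        exact_mod_cast fun h => hij (by exact_mod_cast h)
      simp [this, hij]
  rw [hstep, foldl_if_range i M.length hi' (diagStep x) acc]

-- ===== VERDICT (by name: the statement is the Claim_ definition above) =====
theorem agregarD_spec : Claim_equal_agregarD := by
  intro M x _ _
  unfold Spec_agregarD
  rw [agregarD_eq_fold]
  apply List.ext_getElem?
  intro k
  rw [foldl_diagStep_getElem? x M M.length (le_refl _) k, alt_getElem?]
  by_cases hk : k < M.length
  · rw [if_pos hk]
    have : M[k]? = some M[k] := List.getElem?_eq_getElem hk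
    rw [this]
    simp [List.getD_eq_getElem?_getD, this]
  · rw [if_neg hk]
    have : M[k]? = none := List.getElem?_eq_none (by omega)
    simp [this]
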